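-- pv_equiv track=rewrite | github.com/Gorginee/intern | foobar/study/fib_study.py | func
-- ===== SOURCE A (Python) =====
-- def func(num):
--     index = 0
--     queue = [num]
--     while True:
--         value = queue[index]
--         if value >= 2:
--             queue.pop(index)
--             queue.append(value - 1)
--             queue.append(value - 2)
--         else:
--             if index == len(queue) - 1:
--                 break
--             index += 1
--     return len(queue)
-- ===== SOURCE B (Python) =====
-- def func(num):
--     # Iterative Fibonacci: the leaf count of the recursion tree is Fib(num+1).
--     a, b = 1, 1
--     for _ in range(num - 1):
--         a, b = b, a + b
--     return b
-- ===== Notes on version B (the rewrite author's own statement) =====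
-- stated objective: faster
-- what changed: Replaced the exponential worklist simulation of the Fibonacci recursion tree (pop/append queue until all values are < 2) by an O(num) iterative Fibonacci loop computing the leaf count Fib(num+1) directly.
import Mathlib
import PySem

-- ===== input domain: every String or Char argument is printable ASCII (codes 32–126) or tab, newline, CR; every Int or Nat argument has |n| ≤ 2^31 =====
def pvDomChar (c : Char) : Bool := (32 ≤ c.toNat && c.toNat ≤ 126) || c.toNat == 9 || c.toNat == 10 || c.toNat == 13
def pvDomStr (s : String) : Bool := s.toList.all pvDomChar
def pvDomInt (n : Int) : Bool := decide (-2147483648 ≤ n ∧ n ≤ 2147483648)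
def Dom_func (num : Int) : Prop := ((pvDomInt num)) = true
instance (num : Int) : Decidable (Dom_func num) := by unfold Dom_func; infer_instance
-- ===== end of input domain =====

-- B replaces A's exponential recursion-tree worklist by an O(num) iterative Fibonacci loop.


-- ===== PORT A =====
-- termination measure helpers for the while-loop (the loop itself is A's code)
def funcW (v : Int) : Nat := 3 ^ v.toNat
def funcSumW (l : List Int) : Nat := (l.map funcW).sum

-- the 'while True' loop of A: state = (queue, index).  Fuel-based structural recursion:
-- the fuel is the loop's termination measure (supplied once in func below), so the
-- fuel-exhausted and index-out-of-range arms are unreachable in A's executions and only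
-- totalize the definition.
def funcLoop : Nat → List Int → Nat → Int
  | 0, _, _ => 0
  | fuel + 1, queue, index =>
    match PySem.List.pyGet? queue (index : Int) with
    | none => 0
    | some value =>
      if 2 ≤ value then
        funcLoop fuel (queue.eraseIdx index ++ [value - 1, value - 2]) index
      else
        if index = queue.length - 1 then (queue.length : Int)
        else funcLoop fuel queue (index + 1)

def func (num : Int) : Int := funcLoop (2 * funcSumW [num] + 1) [num] 0

-- ===== PORT B =====
def func_alt (num : Int) : Int :=
  ((PySem.List.pyRange 0 (num - 1) 1).foldl (fun (p : Int × Int) _ => (p.2, p.1 + p.2)) (1, 1)).2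

-- ===== PRECONDITION & SPEC =====
def Spec_func (num : Int) (out : Int) : Prop := out = func_alt num
instance (num : Int) (out : Int) : Decidable (Spec_func num out) := by unfold Spec_func; infer_instance

-- ===== CLAIM (what is proved, stated in full; the proofs are below) =====
def Claim_equal_func : Prop := ∀ (num : Int), Dom_func num → Spec_func num (func num)

-- ===== LEMMAS AND PROOFS =====

theorem funcSumW_eraseIdx (l : List Int) (i : Nat) (h : i < l.length) :
    funcSumW (l.eraseIdx i) + funcW l[i] = funcSumW l := by
  induction l generalizing i with
  | nil => simp at h
  | cons x xs ih =>
    cases i with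
    | zero => simp [funcSumW, List.eraseIdx]; ring
    | succ j =>
      simp only [List.eraseIdx, funcSumW, List.map_cons, List.sum_cons, List.getElem_cons_succ]
      have := ih j (by simpa using h)
      simp only [funcSumW] at this
      omega

theorem funcW_split (v : Int) (hv : 2 ≤ v) : funcW (v - 1) + funcW (v - 2) + 1 ≤ funcW v := by
  unfold funcW
  have h1 : (v - 1).toNat = v.toNat - 1 := by omega
  have h2 : (v - 2).toNat = v.toNat - 2 := by omega
  have h3 : 2 ≤ v.toNat := by omega
  rw [h1, h2]
  obtain ⟨k, hk⟩ : ∃ k, v.toNat = k + 2 := ⟨v.toNat - 2, by omega⟩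
  rw [hk]
  simp only [Nat.add_sub_cancel, Nat.succ_sub_one]
  have : 3 ^ (k + 2) = 3 ^ k * 9 := by ring
  have : 3 ^ (k + 1) = 3 ^ k * 3 := by ring
  have hp : 1 ≤ 3 ^ k := Nat.one_le_pow _ _ (by omega)
  calc 3 ^ (k + 1) + 3 ^ k + 1 ≤ 3 ^ k * 3 + 3 ^ k + 3 ^ k := by
        simp [pow_succ]; omega
    _ ≤ 3 ^ (k + 2) := by rw [pow_succ, pow_succ]; omega

-- leaf count of the Fibonacci recursion tree
def funcF (v : Int) : Int :=
  if v < 2 then 1 else funcF (v - 1) + funcF (v - 2)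
termination_by v.toNat
decreasing_by all_goals omega

theorem funcF_lt (v : Int) (h : v < 2) : funcF v = 1 := by rw [funcF]; simp [h]

theorem funcF_ge (v : Int) (h : 2 ≤ v) : funcF v = funcF (v - 1) + funcF (v - 2) := by
  rw [funcF]; simp [show ¬ v < 2 by omega]

-- invariant: with enough fuel the loop returns index + Σ funcF over the unprocessed suffix
theorem funcLoop_eq (fuel : Nat) (queue : List Int) (index : Nat)
    (hidx : index < queue.length)
    (hfuel : 2 * funcSumW queue + (queue.length - index) ≤ fuel) :
    funcLoop fuel queue index = (index : Int) + ((queue.drop index).map funcF).sum := by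
  induction fuel generalizing queue index with
  | zero => omega
  | succ fuel ih =>
    rcases hget : PySem.List.pyGet? queue (index : Int) with _ | value
    · exfalso
      rw [PySem.List.pyGet?_natCast, List.getElem?_eq_getElem hidx] at hget
      cases hget
    · have hvq : value = queue[index] := by
        rw [PySem.List.pyGet?_natCast, List.getElem?_eq_getElem hidx] at hget
        exact (Option.some.inj hget).symm
      rw [funcLoop]
      split
      · next h2 => rw [hget] at h2; cases h2
      · next v h2 =>
        rw [hget] at h2
        have hvv : value = v := Option.some.inj h2
        subst hvv
        by_cases hv : 2 ≤ value
        · rw [if_pos hv]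
          have hsum := funcSumW_eraseIdx queue index hidx
          have hsplit := funcW_split value hv
          have hlenE : (queue.eraseIdx index).length = queue.length - 1 := by
            simp [List.length_eraseIdx, hidx]
          have hlen : index < (queue.eraseIdx index ++ [value - 1, value - 2]).length := by
            simp [hlenE]; omega
          have hsumA : funcSumW (queue.eraseIdx index ++ [value - 1, value - 2])
              = funcSumW (queue.eraseIdx index) + (funcW (value - 1) + funcW (value - 2)) := by
            simp [funcSumW]
          rw [← hvq] at hsum
          have h2len : ([value - 1, value - 2] : List Int).length = 2 := rfl
          rw [ih _ _ hlen (by simp only [List.length_append, hlenE, h2len]; omega)]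
          have hdropE : (queue.eraseIdx index).drop index = queue.drop (index + 1) := by
            rw [List.eraseIdx_eq_take_drop_succ]
            exact List.drop_left' (by simp [Nat.min_eq_left (le_of_lt hidx)])
          have hdropQ : queue.drop index = queue[index] :: queue.drop (index + 1) :=
            List.drop_eq_getElem_cons hidx
          have hdropA : (queue.eraseIdx index ++ [value - 1, value - 2]).drop index
              = queue.drop (index + 1) ++ [value - 1, value - 2] := by
            rw [List.drop_append_of_le_length, hdropE]
            simp [hlenE]; omega
          rw [hdropA, hdropQ, ← hvq]
          simp only [List.map_append, List.map_cons, List.sum_append, List.sum_cons,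
            List.map_nil, List.sum_nil]
          rw [funcF_ge value hv]
          ring_nf
        · rw [if_neg hv]
          by_cases hlast : index = queue.length - 1
          · rw [if_pos hlast]
            subst hlast
            have hone : queue.length - 1 + 1 = queue.length := by omega
            have hdrop : queue.drop (queue.length - 1) = [queue[queue.length - 1]] := by
              rw [List.drop_eq_getElem_cons hidx, hone]
              simp
            rw [hdrop, ← hvq]
            simp [funcF_lt value (by omega)]
            omega
          · rw [if_neg hlast]
            have hidx' : index + 1 < queue.length := by omega
            rw [ih _ _ hidx' (by omega)]
            have hdropQ : queue.drop index = queue[index] :: queue.drop (index + 1) :=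
              List.drop_eq_getElem_cons hidx
            rw [hdropQ]
            simp only [List.map_cons, List.sum_cons, ← hvq, funcF_lt value (by omega)]
            push_cast
            ring_nf

theorem func_eq_F (num : Int) : func num = funcF num := by
  have h := funcLoop_eq (2 * funcSumW [num] + 1) [num] 0 (by simp)
    (by simp only [List.length_cons, List.length_nil]; omega)
  simpa [func] using h

-- the iterative loop computes (funcF n, funcF (n+1)) after n steps
theorem func_alt_fold (n : Nat) :
    (PySem.List.pyRange 0 (n : Int) 1).foldl (fun (p : Int × Int) _ => (p.2, p.1 + p.2)) (1, 1)
      = (funcF (n : Int), funcF ((n : Int) + 1)) := by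
  induction n with
  | zero =>
    simp [PySem.List.pyRange_one_eq_nil (by omega : (0 : Int) ≤ 0),
      funcF_lt 0 (by omega), funcF_lt 1 (by omega)]
  | succ m ih =>
    have hsplit : PySem.List.pyRange 0 ((m : Int) + 1) 1
        = PySem.List.pyRange 0 (m : Int) 1 ++ [(m : Int)] :=
      PySem.List.pyRange_one_succ_right (by omega)
    push_cast
    rw [hsplit, List.foldl_append, ih]
    simp only [List.foldl_cons, List.foldl_nil]
    rw [funcF_ge ((m : Int) + 1 + 1) (by omega)]
    rw [show ((m : Int) + 1 + 1 - 1) = (m : Int) + 1 by ring,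
        show ((m : Int) + 1 + 1 - 2) = (m : Int) by ring]
    ring_nf

theorem func_alt_eq_F (num : Int) : func_alt num = funcF num := by
  unfold func_alt
  by_cases h : num < 2
  · rw [PySem.List.pyRange_one_eq_nil (by omega)]
    simp [funcF_lt num h]
  · have hpos : 0 ≤ num - 1 := by omega
    have hcast : ((num - 1).toNat : Int) = num - 1 := by omega
    rw [← hcast, func_alt_fold]
    have h2 : ((num - 1).toNat : Int) + 1 = num := by omega
    show funcF (((num - 1).toNat : Int) + 1) = funcF num
    rw [h2]

-- ===== VERDICT (by name: the statement is the Claim_ definition above) =====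
theorem func_spec : Claim_equal_func := by
  intro num _
  unfold Spec_func
  rw [func_eq_F, func_alt_eq_F]
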